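-- pv_equiv track=rewrite | github.com/tsrnd/hello-python | PracticCodeSyntax.py | sortByHeight2
-- ===== SOURCE A (Python) =====
-- def sortByHeight2(a):
--     result = []
--     notTree = [elem for elem in a if elem != -1]
--     notTree.sort()
--     notTree.reverse()
--     for element in a:
--         if element == -1:
--             result.append(element)
--         else:
--             result.append(notTree.pop())
--     return result
-- ===== SOURCE B (Python) =====
-- def sortByHeight2(a):
--     out = []
--     rest = list(a)
--     while rest:
--         x = rest.pop(0)
--         if x == -1:
--             out.append(-1)
--             continue
--         m, p = x, -1
--         for j, v in enumerate(rest):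
--             if v != -1 and v < m:
--                 m, p = v, j
--         if p >= 0:
--             rest[p] = x
--         out.append(m)
--     return out
-- ===== Notes on version B (the rewrite author's own statement) =====
-- stated objective: alternative
-- what changed: B never sorts: it is an in-place selection sort that repeatedly scans the remaining suffix for the smallest non-(-1) value, emits it, and swaps the displaced head value into the vacated slot, whereas A builds a sorted stack of the non-(-1) values up front and pops from it while rebuilding the list.
import Mathlib
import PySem

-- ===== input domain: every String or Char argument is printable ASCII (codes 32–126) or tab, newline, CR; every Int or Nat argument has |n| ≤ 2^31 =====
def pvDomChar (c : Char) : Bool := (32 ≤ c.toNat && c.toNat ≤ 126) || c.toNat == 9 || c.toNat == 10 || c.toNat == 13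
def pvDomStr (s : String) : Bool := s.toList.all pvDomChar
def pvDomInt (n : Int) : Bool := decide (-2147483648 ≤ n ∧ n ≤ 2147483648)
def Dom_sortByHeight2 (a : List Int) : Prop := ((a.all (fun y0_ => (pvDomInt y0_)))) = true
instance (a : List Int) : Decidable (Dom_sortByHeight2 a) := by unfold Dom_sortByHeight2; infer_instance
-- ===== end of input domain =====

-- B replaces A's sort-a-stack-then-pop rebuild by an in-place selection sort over the
-- shrinking suffix (repeated min-extraction, swapping the head into the vacated slot);
-- objective: alternative algorithm, no library sort; not faster (O(n^2) vs O(n log n)).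

-- ===== PORT A =====
-- the for-loop of A: walk a, appending -1 as is and otherwise notTree.pop() (last element)
def pvALoop : List Int → List Int → List Int
  | [], _ => []
  | x :: xs, stack =>
    if x = -1 then x :: pvALoop xs stack
    else
      match stack.getLast? with
      | some v => v :: pvALoop xs stack.dropLast
      | none => []   -- Python's pop() would raise IndexError here; unreachable (counts match)

def sortByHeight2 (a : List Int) : List Int :=
  let notTree := PySem.List.sorted (a.filter (fun e => e ≠ -1)) (fun x => x) false
  pvALoop a notTree.reverse

-- ===== PORT B =====
-- the inner 'for j, v in enumerate(rest)' loop: track (m, p)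
def pvSelStep (mp : Int × Int) (jv : Int × Int) : Int × Int :=
  if jv.2 ≠ -1 ∧ jv.2 < mp.1 then (jv.2, jv.1) else mp

-- the while loop: pop the head, select the min of the suffix, swap the head into its slot
def sortByHeight2_alt : List Int → List Int
  | [] => []
  | x :: rest =>
    if x = -1 then -1 :: sortByHeight2_alt rest
    else
      let mp := (PySem.List.enumerate rest 0).foldl pvSelStep (x, -1)
      if 0 ≤ mp.2 then mp.1 :: sortByHeight2_alt (rest.set mp.2.toNat x)
      else mp.1 :: sortByHeight2_alt rest
termination_by a => a.length
decreasing_by all_goals simp [List.length_set]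

-- ===== PRECONDITION & SPEC =====
def Spec_sortByHeight2 (a : List Int) (out : List Int) : Prop := out = sortByHeight2_alt a
instance (a : List Int) (out : List Int) : Decidable (Spec_sortByHeight2 a out) := by unfold Spec_sortByHeight2; infer_instance

-- ===== CLAIM (what is proved, stated in full; the proofs are below) =====
def Claim_equal_sortByHeight2 : Prop := ∀ (a : List Int), Dom_sortByHeight2 a → Spec_sortByHeight2 a (sortByHeight2 a)

-- ===== LEMMAS AND PROOFS =====

-- common spine: consume the ascending sorted values front to back
def pvSpine : List Int → List Int → List Int
  | [], _ => []
  | x :: xs, s =>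
    if x = -1 then x :: pvSpine xs s
    else
      match s with
      | v :: s' => v :: pvSpine xs s'
      | [] => []

def pvSorted (a : List Int) : List Int :=
  PySem.List.sorted (a.filter (fun e => e ≠ -1)) (fun x => x) false

lemma pvALoop_reverse (xs : List Int) : ∀ s : List Int, pvALoop xs s.reverse = pvSpine xs s := by
  induction xs with
  | nil => intro s; rfl
  | cons x xs ih =>
    intro s
    by_cases hx : x = -1
    · simp [pvALoop, pvSpine, hx, ih]
    · cases s with
      | nil => simp [pvALoop, pvSpine, hx]
      | cons v s' =>
        simp [pvALoop, pvSpine, hx, List.getLast?_reverse, ih]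

-- pvSpine only looks at the (-1)-pattern of its first argument
lemma pvSpine_congr_mid (u w : List Int) (b c : Int) (hb : b ≠ -1) (hc : c ≠ -1) :
    ∀ s, pvSpine (u ++ b :: w) s = pvSpine (u ++ c :: w) s := by
  induction u with
  | nil =>
    intro s
    cases s with
    | nil => simp [pvSpine, hb, hc]
    | cons v s' => simp [pvSpine, hb, hc]
  | cons y u ih =>
    intro s
    by_cases hy : y = -1
    · simp [pvSpine, hy, ih]
    · cases s with
      | nil => simp [pvSpine, hy]
      | cons v s' => simp [pvSpine, hy, ih]

-- the running minimum (first component of the fold)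
def pvMin (l : List Int) (m0 : Int) : Int :=
  l.foldl (fun m v => if v ≠ -1 ∧ v < m then v else m) m0

lemma pvFold_fst (l : List Int) : ∀ (m0 p0 : Int) (i0 : Int),
    ((PySem.List.enumerate l i0).foldl pvSelStep (m0, p0)).1 = pvMin l m0 := by
  induction l with
  | nil => intro m0 p0 i0; rfl
  | cons v l ih =>
    intro m0 p0 i0
    rw [PySem.List.enumerate_cons]
    rw [List.foldl_cons]
    by_cases hv : v ≠ -1 ∧ v < m0
    · rw [show pvSelStep (m0, p0) (i0, v) = (v, i0) by simp [pvSelStep, hv], ih]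
      simp [pvMin, hv]
    · rw [show pvSelStep (m0, p0) (i0, v) = (m0, p0) by simp [pvSelStep, hv], ih]
      simp [pvMin, hv]

lemma pvMin_le (l : List Int) : ∀ m0, pvMin l m0 ≤ m0 := by
  induction l with
  | nil => intro m0; simp [pvMin]
  | cons v l ih =>
    intro m0
    by_cases hv : v ≠ -1 ∧ v < m0
    · have := ih v
      simp only [pvMin, List.foldl_cons, if_pos hv]
      exact le_trans this (le_of_lt hv.2)
    · simpa [pvMin, hv] using ih m0

lemma pvMin_le_mem (l : List Int) : ∀ m0 v, v ∈ l → v ≠ -1 → pvMin l m0 ≤ v := by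
  induction l with
  | nil => intro _ v h; cases h
  | cons w l ih =>
    intro m0 v hv hne
    by_cases hw : w ≠ -1 ∧ w < m0
    · rcases List.mem_cons.1 hv with h | h
      · subst h
        simp only [pvMin, List.foldl_cons, if_pos hw]
        exact pvMin_le l v
      · simpa [pvMin, hw] using ih w v h hne
    · rcases List.mem_cons.1 hv with h | h
      · subst h
        have : m0 ≤ v := by
          by_contra hlt
          exact hw ⟨hne, lt_of_not_ge hlt⟩
        simp only [pvMin, List.foldl_cons, if_neg hw]
        exact le_trans (pvMin_le l m0) this
      · simpa [pvMin, hw] using ih m0 v h hne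

lemma pvMin_eq_or (l : List Int) : ∀ m0, pvMin l m0 = m0 ∨ (pvMin l m0 ∈ l ∧ pvMin l m0 ≠ -1) := by
  induction l with
  | nil => intro m0; left; rfl
  | cons v l ih =>
    intro m0
    by_cases hv : v ≠ -1 ∧ v < m0
    · have h := ih v
      simp only [pvMin, List.foldl_cons, if_pos hv]
      rcases h with h | h
      · right
        refine ⟨?_, ?_⟩
        · simp only [pvMin] at h ⊢; rw [h]; simp
        · simp only [pvMin] at h ⊢; rw [h]; exact hv.1
      · right; exact ⟨List.mem_cons_of_mem _ h.1, h.2⟩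
    · have h := ih m0
      simp only [pvMin, List.foldl_cons, if_neg hv]
      rcases h with h | h
      · left; exact h
      · right; exact ⟨List.mem_cons_of_mem _ h.1, h.2⟩

-- if the initial m0 is already minimal, p never changes
lemma pvFold_snd_of_min (l : List Int) : ∀ (m0 p0 i0 : Int), pvMin l m0 = m0 →
    ((PySem.List.enumerate l i0).foldl pvSelStep (m0, p0)).2 = p0 := by
  induction l with
  | nil => intro m0 p0 i0 _; rfl
  | cons v l ih =>
    intro m0 p0 i0 hmin
    rw [PySem.List.enumerate_cons]
    by_cases hv : v ≠ -1 ∧ v < m0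
    · exfalso
      have h1 : pvMin (v :: l) m0 = pvMin l v := by simp [pvMin, hv]
      have := pvMin_le l v
      rw [hmin] at h1
      omega
    · have h1 : pvMin (v :: l) m0 = pvMin l m0 := by simp [pvMin, hv]
      rw [hmin] at h1
      simp only [List.foldl_cons, pvSelStep, if_neg hv]
      exact ih m0 p0 (i0 + 1) h1.symm

-- if the minimum beats m0, p is the index of its first occurrence
lemma pvFold_snd_of_lt (l : List Int) : ∀ (m0 p0 i0 : Int), pvMin l m0 ≠ m0 →
    ((PySem.List.enumerate l i0).foldl pvSelStep (m0, p0)).2 = i0 + (l.idxOf (pvMin l m0) : Int) := by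
  induction l with
  | nil => intro m0 p0 i0 h; exact absurd rfl h
  | cons v l ih =>
    intro m0 p0 i0 hne
    rw [PySem.List.enumerate_cons]
    by_cases hv : v ≠ -1 ∧ v < m0
    · have h1 : pvMin (v :: l) m0 = pvMin l v := by simp [pvMin, hv]
      simp only [List.foldl_cons, pvSelStep, if_pos hv]
      by_cases h2 : pvMin l v = v
      · rw [pvFold_snd_of_min l v i0 (i0 + 1) h2]
        rw [h1, h2, List.idxOf_cons_self]
        simp
      · rw [ih v i0 (i0 + 1) h2, h1]
        have hvne : pvMin l v ≠ v := h2
        rw [List.idxOf_cons_ne _ (by exact fun h => hvne h.symm)]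
        push_cast
        ring
    · have h1 : pvMin (v :: l) m0 = pvMin l m0 := by simp [pvMin, hv]
      rw [h1] at hne
      have hμv : pvMin l m0 ≠ v := by
        rcases pvMin_eq_or l m0 with h | h
        · exact absurd h hne
        · rcases not_and_or.1 hv with h' | h'
          · push_neg at h'
            intro he; exact h.2 (he.trans h')
          · have := pvMin_le l m0
            intro he; omega
      simp only [List.foldl_cons, pvSelStep, if_neg hv]
      rw [ih m0 p0 (i0 + 1) hne, h1]
      rw [List.idxOf_cons_ne _ (by exact fun h => hμv h.symm)]
      push_cast
      ring

-- swap permutation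
lemma pvPerm_swap_mid (a b : Int) (u w : List Int) :
    (a :: (u ++ b :: w)).Perm (b :: (u ++ a :: w)) := by
  refine ((List.perm_middle.cons a).trans ?_).trans ((List.perm_middle.symm).cons b)
  exact List.Perm.swap _ _ _

-- the key sorted-list step: extracting the minimum
lemma pvSorted_cons_step (x : Int) (u w : List Int) (μ : Int)
    (hx : x ≠ -1) (hμ : μ ≠ -1)
    (hle : ∀ v ∈ (u ++ μ :: w).filter (fun e => decide (e ≠ -1)), μ ≤ v) (hlex : μ ≤ x) :
    pvSorted (x :: (u ++ μ :: w)) = μ :: pvSorted (u ++ x :: w) := by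
  unfold pvSorted
  apply PySem.List.sorted_id_eq_of_perm_of_pairwise
  · -- permutation
    have h1 : (u ++ x :: w).filter (fun e => decide (e ≠ -1))
        = u.filter (fun e => decide (e ≠ -1)) ++ x :: w.filter (fun e => decide (e ≠ -1)) := by
      simp [List.filter_append, hx]
    have h2 : (u ++ μ :: w).filter (fun e => decide (e ≠ -1))
        = u.filter (fun e => decide (e ≠ -1)) ++ μ :: w.filter (fun e => decide (e ≠ -1)) := by
      simp [List.filter_append, hμ]
    have hs := PySem.List.sorted_perm ((u ++ x :: w).filter (fun e => decide (e ≠ -1))) (fun x => x) false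
    have hp1 : (μ :: PySem.List.sorted ((u ++ x :: w).filter (fun e => decide (e ≠ -1))) (fun x => x) false).Perm
        (μ :: (u.filter (fun e => decide (e ≠ -1)) ++ x :: w.filter (fun e => decide (e ≠ -1)))) := by
      rw [← h1]; exact hs.cons μ
    have hp2 := pvPerm_swap_mid μ x (u.filter (fun e => decide (e ≠ -1))) (w.filter (fun e => decide (e ≠ -1)))
    have hgoal := hp1.trans hp2
    rw [show (x :: (u ++ μ :: w)).filter (fun e => decide (e ≠ -1))
          = x :: (u.filter (fun e => decide (e ≠ -1)) ++ μ :: w.filter (fun e => decide (e ≠ -1))) by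
        rw [List.filter_cons_of_pos (by simp [hx]), h2]]
    exact hgoal
  · -- pairwise ≤
    apply List.Pairwise.cons
    · intro v hv
      have hv' := (PySem.List.mem_sorted _ _ _ _).1 hv
      have hmem : v ∈ (u ++ x :: w).filter (fun e => decide (e ≠ -1)) := hv'
      rw [List.mem_filter] at hmem
      rcases List.mem_append.1 hmem.1 with h | h
      · exact hle v (by rw [List.mem_filter]; exact ⟨List.mem_append_left _ h, hmem.2⟩)
      · rcases List.mem_cons.1 h with h | h
        · subst h; exact hlex
        · exact hle v (by
            rw [List.mem_filter]
            exact ⟨List.mem_append_right _ (List.mem_cons_of_mem _ h), hmem.2⟩)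
    · exact PySem.List.sorted_pairwise _ _

lemma pvB_eq_spine : ∀ (n : Nat) (a : List Int), a.length ≤ n →
    sortByHeight2_alt a = pvSpine a (pvSorted a) := by
  intro n
  induction n with
  | zero =>
    intro a ha
    have : a = [] := List.length_eq_zero_iff.1 (Nat.le_zero.1 ha)
    subst this; rw [sortByHeight2_alt]; rfl
  | succ n ih =>
    intro a ha
    match a with
    | [] => rw [sortByHeight2_alt]; rfl
    | x :: rest =>
      by_cases hx : x = -1
      · subst hx
        rw [sortByHeight2_alt]
        have hrec := ih rest (by simpa using Nat.le_of_succ_le_succ ha)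
        have hfil : pvSorted ((-1) :: rest) = pvSorted rest := by
          unfold pvSorted; simp
        simp [hrec, hfil, pvSpine]
      · rw [sortByHeight2_alt]
        simp only [if_neg hx]
        set mp := (PySem.List.enumerate rest 0).foldl pvSelStep (x, -1) with hmp
        have hfst : mp.1 = pvMin rest x := pvFold_fst rest x (-1) 0
        by_cases hmin : pvMin rest x = x
        · -- head already minimal: p stays -1
          have hsnd : mp.2 = -1 := pvFold_snd_of_min rest x (-1) 0 hmin
          rw [if_neg (by omega)]
          rw [ih rest (by simpa using Nat.le_of_succ_le_succ ha)]
          have hsort : pvSorted (x :: rest) = x :: pvSorted rest := by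
            unfold pvSorted
            apply PySem.List.sorted_id_eq_of_perm_of_pairwise
            · have hs := PySem.List.sorted_perm (rest.filter (fun e => decide (e ≠ -1))) (fun x => x) false
              rw [List.filter_cons_of_pos (by simp [hx])]
              exact hs.cons x
            · apply List.Pairwise.cons
              · intro v hv
                have hv' := (PySem.List.mem_sorted _ _ _ _).1 hv
                rw [List.mem_filter] at hv'
                have := pvMin_le_mem rest x v hv'.1 (by simpa using hv'.2)
                omega
              · exact PySem.List.sorted_pairwise _ _
          rw [hsort, hfst, hmin]
          simp [pvSpine, hx]
        · -- the minimum μ is in rest at first index idxOf μ rest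
          have hsnd : mp.2 = (rest.idxOf (pvMin rest x) : Int) :=
            by simpa using pvFold_snd_of_lt rest x (-1) 0 hmin
          set μ := pvMin rest x with hμdef
          have hμmem : μ ∈ rest ∧ μ ≠ -1 := by
            rcases pvMin_eq_or rest x with h | h
            · exact absurd h hmin
            · exact h
          rw [if_pos (by rw [hsnd]; exact Int.natCast_nonneg _)]
          have hidx : rest.idxOf μ < rest.length := List.idxOf_lt_length_of_mem hμmem.1
          obtain ⟨u, w, huw, hulen⟩ : ∃ u w, rest = u ++ μ :: w ∧ u.length = rest.idxOf μ := by
            refine ⟨rest.take (rest.idxOf μ), rest.drop (rest.idxOf μ + 1), ?_,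
              by simp [Nat.le_of_lt hidx]⟩
            conv_lhs => rw [← List.take_append_drop (rest.idxOf μ) rest]
            congr 1
            rw [List.drop_eq_getElem_cons hidx, List.getElem_idxOf hidx]
          have hset : rest.set mp.2.toNat x = u ++ x :: w := by
            rw [hsnd]
            simp only [Int.toNat_natCast]
            rw [← hulen, huw]
            simp
          rw [hset]
          rw [ih (u ++ x :: w) (by
            have h1 : (u ++ x :: w).length = rest.length := by rw [huw]; simp
            have h2 : rest.length + 1 ≤ n + 1 := by simpa using ha
            omega)]
          have hle : ∀ v ∈ (u ++ μ :: w).filter (fun e => decide (e ≠ -1)), μ ≤ v := by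
            intro v hv
            rw [List.mem_filter] at hv
            exact pvMin_le_mem rest x v (by rw [huw]; exact hv.1) (by simpa using hv.2)
          have hlex : μ ≤ x := pvMin_le rest x
          have hsort := pvSorted_cons_step x u w μ hx hμmem.2 hle hlex
          rw [hfst, hμdef] at *
          rw [show pvSorted (x :: rest) = pvSorted (x :: (u ++ μ :: w)) by rw [huw]]
          rw [show pvSpine (x :: rest) = pvSpine (x :: (u ++ μ :: w)) by rw [huw]]
          rw [hsort]
          rw [show pvSpine (x :: (u ++ μ :: w)) (μ :: pvSorted (u ++ x :: w))
                = μ :: pvSpine (u ++ μ :: w) (pvSorted (u ++ x :: w)) by simp [pvSpine, hx]]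
          rw [pvSpine_congr_mid u w μ x hμmem.2 hx]

-- ===== VERDICT (by name: the statement is the Claim_ definition above) =====
theorem sortByHeight2_spec : Claim_equal_sortByHeight2 := by
  intro a _
  unfold Spec_sortByHeight2 sortByHeight2
  rw [pvB_eq_spine a.length a (le_refl _)]
  exact pvALoop_reverse a (pvSorted a)
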